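-- pv_equiv track=rewrite | github.com/Pjoterro/adventofocde | 2015/day08.py | escape_and_count
-- ===== SOURCE A (Python) =====
-- def escape_and_count(line):
--     old_len = len(line)
--     new_line = '\"'
--     i = 0
--     while i < len(line):
--         if line[i] == '"':
--             new_line += '\\\"'
--         elif line[i] == '\\':
--             new_line += '\\\\'
--         else:
--             new_line += line[i]
--         i += 1
--     new_line += '\"'
--     new_len = len(new_line)
--     return old_len, new_len
-- ===== SOURCE B (Python) =====
-- def escape_and_count(line):
--     old_len = len(line)
--     new_len = old_len + 2 + line.count('"') + line.count('\\')
--     return old_len, new_len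
-- ===== Notes on version B (the rewrite author's own statement) =====
-- stated objective: faster
-- what changed: Replaces the character-by-character construction of the escaped string with a closed-form count: new_len = old_len + 2 + number of quotes and backslashes, building no string at all.
import Mathlib
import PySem

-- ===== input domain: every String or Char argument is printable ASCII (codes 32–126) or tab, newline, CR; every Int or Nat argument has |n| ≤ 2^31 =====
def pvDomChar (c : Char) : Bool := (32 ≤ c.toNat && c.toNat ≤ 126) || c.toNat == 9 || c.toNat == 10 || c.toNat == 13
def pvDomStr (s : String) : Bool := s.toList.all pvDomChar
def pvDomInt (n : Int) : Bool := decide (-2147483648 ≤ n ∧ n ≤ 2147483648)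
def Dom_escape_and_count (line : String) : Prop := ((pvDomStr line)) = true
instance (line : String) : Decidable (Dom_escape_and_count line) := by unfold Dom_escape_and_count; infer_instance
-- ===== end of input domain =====

-- B replaces the per-character string construction with a closed-form count (no string is built); objective: faster.

-- ===== PORT A =====
-- one step of A's while loop: append the escaped form of the current character
def escStepA (acc : List Char) (c : Char) : List Char :=
  if c = '"' then acc ++ ['\\', '"']
  else if c = '\\' then acc ++ ['\\', '\\']
  else acc ++ [c]

def escape_and_count (line : String) : Int × Int :=
  let old_len : Int := (PySem.Str.len line : Int)
  let new_line : List Char := line.toList.foldl escStepA ['"']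
  let new_line := new_line ++ ['"']
  let new_len : Int := (new_line.length : Int)
  (old_len, new_len)

-- ===== PORT B =====
def escape_and_count_alt (line : String) : Int × Int :=
  let old_len : Int := (PySem.Str.len line : Int)
  let new_len : Int := old_len + 2 + (PySem.Str.count line "\"" : Int) + (PySem.Str.count line "\\" : Int)
  (old_len, new_len)

-- ===== PRECONDITION & SPEC =====
def Spec_escape_and_count (line : String) (out : Int × Int) : Prop := out = escape_and_count_alt line
instance (line : String) (out : Int × Int) : Decidable (Spec_escape_and_count line out) := by unfold Spec_escape_and_count; infer_instance

-- ===== CLAIM (what is proved, stated in full; the proofs are below) =====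
def Claim_equal_escape_and_count : Prop := ∀ (line : String), Dom_escape_and_count line → Spec_escape_and_count line (escape_and_count line)

-- ===== LEMMAS AND PROOFS =====
theorem escStepA_foldl_length (l : List Char) (acc : List Char) :
    (l.foldl escStepA acc).length
      = acc.length + l.length + l.count '"' + l.count '\\' := by
  induction l generalizing acc with
  | nil => simp
  | cons c cs ih =>
    simp only [List.foldl_cons, List.count_cons, ih]
    unfold escStepA
    by_cases h1 : c = '"'
    · subst h1; simp; omega
    · by_cases h2 : c = '\\'
      · subst h2; simp [h1]; omega
      · simp [h1, h2]; omega

theorem countgo_singleton (c : Char) (l : List Char) (acc fuel : Nat) (h : l.length ≤ fuel) :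
    PySem.Chars.count.go [c] fuel l acc = acc + l.count c := by
  induction l generalizing fuel acc with
  | nil => cases fuel <;> simp [PySem.Chars.count.go]
  | cons x t ih =>
    cases fuel with
    | zero => simp at h
    | succ n =>
      simp only [PySem.Chars.count.go]
      simp only [List.length_cons, Nat.add_le_add_iff_right] at h
      by_cases hx : c = x
      · subst hx
        simp [List.isPrefixOf, ih _ _ h]
        omega
      · simp [List.isPrefixOf, Ne.symm hx, ih _ _ h, hx]

theorem str_count_singleton (s : String) (c : Char) :
    PySem.Str.count s (String.ofList [c]) = s.toList.count c := by
  have h1 : (String.ofList [c]).toList = [c] := by simp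
  simp only [PySem.Str.count_eq, h1]
  unfold PySem.Chars.count
  have hf : s.toList.length ≤ s.length := by simp
  simp [countgo_singleton c s.toList 0 s.length hf]

-- ===== VERDICT (by name: the statement is the Claim_ definition above) =====
theorem escape_and_count_spec : Claim_equal_escape_and_count := by
  intro line _
  unfold Spec_escape_and_count escape_and_count escape_and_count_alt
  have h1 : PySem.Str.count line "\"" = line.toList.count '"' := str_count_singleton line '"'
  have h2 : PySem.Str.count line "\\" = line.toList.count '\\' := str_count_singleton line '\\'
  simp only [List.length_append, escStepA_foldl_length, PySem.Str.len_eq, h1, h2]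
  simp
  omega
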